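-- pv_equiv track=rewrite | github.com/kkornis/advent-of-code | 2024/21/main2421.py | resolve_directional_keypad
-- ===== SOURCE A (Python) =====
-- from collections import Counter
--
-- dir_map = {'<': (1, 0), '>': (1, 2), '^': (0, 1), 'v': (1, 1), 'A': (0, 2)}
--
-- def resolve_directional_keypad(code):
--     star_pos = (0, 2)
--     res = Counter()
--     for c in code:
--         char_pos = dir_map[c]
--
--         piece = ''
--         if char_pos[0] < star_pos[0]:
--             if char_pos[1] < star_pos[1]:
--                 piece += '<' * (star_pos[1] - char_pos[1])
--                 piece += '^' * (star_pos[0] - char_pos[0])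
--             elif char_pos[1] > star_pos[1]:
--                 if char_pos[0] == 0 and star_pos[1] == 0:
--                     piece += '>' * (char_pos[1] - star_pos[1])
--                     piece += '^' * (star_pos[0] - char_pos[0])
--                 else:
--                     piece += '^' * (star_pos[0] - char_pos[0])
--                     piece += '>' * (char_pos[1] - star_pos[1])
--             else:
--                 piece += '^' * (star_pos[0] - char_pos[0])
--
--         elif char_pos[0] > star_pos[0]:
--             if char_pos[1] < star_pos[1]:
--                 if char_pos[1] == 0 and star_pos[0] == 0:
--                     piece += 'v' * (char_pos[0] - star_pos[0])
--                     piece += '<' * (star_pos[1] - char_pos[1])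
--                 else:
--                     piece += '<' * (star_pos[1] - char_pos[1])
--                     piece += 'v' * (char_pos[0] - star_pos[0])
--             elif char_pos[1] > star_pos[1]:
--                 piece += 'v' * (char_pos[0] - star_pos[0])
--                 piece += '>' * (char_pos[1] - star_pos[1])
--             else:
--                 piece += 'v' * (char_pos[0] - star_pos[0])
--
--         else:
--             if char_pos[1] < star_pos[1]:
--                 piece += '<' * (star_pos[1] - char_pos[1])
--             elif char_pos[1] > star_pos[1]:
--                 piece += '>' * (char_pos[1] - star_pos[1])
--             else:
--                 piece += 'v' * (char_pos[0] - star_pos[0])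
--
--         star_pos = char_pos
--
--         piece += 'A'
--         res[piece] += 1
--     return res
-- ===== SOURCE B (Python) =====
-- from collections import Counter
--
-- # Precomputed movement piece (with trailing 'A') for every keypad transition (prev, cur).
-- TRANS = {
--     ('<', '<'): 'A', ('<', '>'): '>>A', ('<', '^'): '>^A', ('<', 'v'): '>A', ('<', 'A'): '>>^A',
--     ('>', '<'): '<<A', ('>', '>'): 'A', ('>', '^'): '<^A', ('>', 'v'): '<A', ('>', 'A'): '^A',
--     ('^', '<'): 'v<A', ('^', '>'): 'v>A', ('^', '^'): 'A', ('^', 'v'): 'vA', ('^', 'A'): '>A',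
--     ('v', '<'): '<A', ('v', '>'): '>A', ('v', '^'): '^A', ('v', 'v'): 'A', ('v', 'A'): '^>A',
--     ('A', '<'): 'v<<A', ('A', '>'): 'vA', ('A', '^'): '<A', ('A', 'v'): '<vA', ('A', 'A'): 'A',
-- }
--
-- def resolve_directional_keypad(code):
--     res = Counter()
--     prev = 'A'
--     for c in code:
--         res[TRANS[(prev, c)]] += 1
--         prev = c
--     return res
-- ===== Notes on version B (the rewrite author's own statement) =====
-- stated objective: simpler
-- what changed: Replaces the per-character geometry branch cascade (coordinate lookup plus nested gap-avoidance cases building each piece by string repetition) with a precomputed 25-entry transition table keyed by (previous key, current key); the loop body becomes a single dictionary lookup.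
import Mathlib
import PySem

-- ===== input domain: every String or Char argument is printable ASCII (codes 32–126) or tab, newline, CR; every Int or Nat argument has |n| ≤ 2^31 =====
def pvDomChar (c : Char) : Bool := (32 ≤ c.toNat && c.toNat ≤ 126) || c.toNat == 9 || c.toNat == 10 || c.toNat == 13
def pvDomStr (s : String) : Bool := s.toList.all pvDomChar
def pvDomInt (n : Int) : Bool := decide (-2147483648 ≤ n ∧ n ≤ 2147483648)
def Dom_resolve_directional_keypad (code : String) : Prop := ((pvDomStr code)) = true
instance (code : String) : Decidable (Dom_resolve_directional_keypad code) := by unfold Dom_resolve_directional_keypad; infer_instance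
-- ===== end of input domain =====

-- B replaces A's nested gap-avoidance geometry with a precomputed 25-entry transition table; objective: simpler.

-- ===== PORT A =====
def dirMapA : PySem.Dict Char (Int × Int) :=
  PySem.Dict.ofList [('<', (1, 0)), ('>', (1, 2)), ('^', (0, 1)), ('v', (1, 1)), ('A', (0, 2))]

-- 'c' * n for n ≥ 0 (all uses are branch-guarded to nonnegative counts)
def repA (c : Char) (n : Int) : List Char := List.replicate n.toNat c

-- the piece built for one character, following A's branch structure exactly
def pieceA (star charp : Int × Int) : List Char :=
  if charp.1 < star.1 then
    if charp.2 < star.2 then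
      repA '<' (star.2 - charp.2) ++ repA '^' (star.1 - charp.1)
    else if charp.2 > star.2 then
      if charp.1 = 0 ∧ star.2 = 0 then
        repA '>' (charp.2 - star.2) ++ repA '^' (star.1 - charp.1)
      else
        repA '^' (star.1 - charp.1) ++ repA '>' (charp.2 - star.2)
    else
      repA '^' (star.1 - charp.1)
  else if charp.1 > star.1 then
    if charp.2 < star.2 then
      if charp.2 = 0 ∧ star.1 = 0 then
        repA 'v' (charp.1 - star.1) ++ repA '<' (star.2 - charp.2)
      else
        repA '<' (star.2 - charp.2) ++ repA 'v' (charp.1 - star.1)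
    else if charp.2 > star.2 then
      repA 'v' (charp.1 - star.1) ++ repA '>' (charp.2 - star.2)
    else
      repA 'v' (charp.1 - star.1)
  else
    if charp.2 < star.2 then
      repA '<' (star.2 - charp.2)
    else if charp.2 > star.2 then
      repA '>' (charp.2 - star.2)
    else
      repA 'v' (charp.1 - star.1)

-- A's loop; none = KeyError on dir_map[c] (excluded by Pre_)
def loopA : List Char → (Int × Int) → PySem.Dict String Int → Option (PySem.Dict String Int)
  | [], _, res => some res
  | c :: rest, star, res =>
    match dirMapA.get? c with
    | none => none
    | some charp =>
      loopA rest charp (res.modify (String.ofList (pieceA star charp ++ ['A'])) 0 (· + 1))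

def resolve_directional_keypad (code : String) : List (String × Int) :=
  (loopA code.toList (0, 2) PySem.Dict.empty).elim [] PySem.Dict.items

-- ===== PORT B =====
def transB : PySem.Dict (Char × Char) String :=
  PySem.Dict.ofList
    [ (('<', '<'), "A"), (('<', '>'), ">>A"), (('<', '^'), ">^A"), (('<', 'v'), ">A"), (('<', 'A'), ">>^A"),
      (('>', '<'), "<<A"), (('>', '>'), "A"), (('>', '^'), "<^A"), (('>', 'v'), "<A"), (('>', 'A'), "^A"),
      (('^', '<'), "v<A"), (('^', '>'), "v>A"), (('^', '^'), "A"), (('^', 'v'), "vA"), (('^', 'A'), ">A"),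
      (('v', '<'), "<A"), (('v', '>'), ">A"), (('v', '^'), "^A"), (('v', 'v'), "A"), (('v', 'A'), "^>A"),
      (('A', '<'), "v<<A"), (('A', '>'), "vA"), (('A', '^'), "<A"), (('A', 'v'), "<vA"), (('A', 'A'), "A") ]

-- B's loop; none = KeyError on TRANS[(prev, c)] (excluded by Pre_)
def loopB : List Char → Char → PySem.Dict String Int → Option (PySem.Dict String Int)
  | [], _, res => some res
  | c :: rest, prev, res =>
    match transB.get? (prev, c) with
    | none => none
    | some piece => loopB rest c (res.modify piece 0 (· + 1))

def resolve_directional_keypad_alt (code : String) : List (String × Int) :=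
  (loopB code.toList 'A' PySem.Dict.empty).elim [] PySem.Dict.items

-- ===== PRECONDITION & SPEC =====
-- Pre_ excludes exactly the codes containing a character outside the keypad, on which A raises KeyError.
def keyOK (c : Char) : Bool := c == '<' || c == '>' || c == '^' || c == 'v' || c == 'A'

def Pre_resolve_directional_keypad (code : String) : Prop :=
  code.toList.all keyOK = true
instance (code : String) : Decidable (Pre_resolve_directional_keypad code) := by
  unfold Pre_resolve_directional_keypad; infer_instance

def pvWitness_resolve_directional_keypad : String := "v<A^>A"

def Spec_resolve_directional_keypad (code : String) (out : List (String × Int)) : Prop := out = resolve_directional_keypad_alt code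
instance (code : String) (out : List (String × Int)) : Decidable (Spec_resolve_directional_keypad code out) := by unfold Spec_resolve_directional_keypad; infer_instance

-- ===== CLAIM (what is proved, stated in full; the proofs are below) =====
def Claim_equal_resolve_directional_keypad : Prop := ∀ (code : String), Dom_resolve_directional_keypad code → Pre_resolve_directional_keypad code → Spec_resolve_directional_keypad code (resolve_directional_keypad code)

-- ===== LEMMAS AND PROOFS =====

-- A's star position for a valid key (only used by the proofs)
def dval : Char → Int × Int
  | '<' => (1, 0)
  | '>' => (1, 2)
  | '^' => (0, 1)
  | 'v' => (1, 1)
  | _   => (0, 2)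

theorem memK : ∀ c : Char, keyOK c = true → c ∈ ['<', '>', '^', 'v', 'A'] := by
  intro c h
  simp only [keyOK, Bool.or_eq_true, beq_iff_eq] at h
  rcases h with ((((h | h) | h) | h) | h) <;> simp [h]

theorem tableOK : ∀ p c : Char, p ∈ ['<', '>', '^', 'v', 'A'] → c ∈ ['<', '>', '^', 'v', 'A'] →
    dirMapA.get? c = some (dval c) ∧
    transB.get? (p, c) = some (String.ofList (pieceA (dval p) (dval c) ++ ['A'])) := by
  intro p c hp hc
  fin_cases hp <;> fin_cases hc <;> exact ⟨by decide, by decide⟩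

theorem loop_eq : ∀ (rest : List Char) (prev : Char) (res : PySem.Dict String Int),
    prev ∈ ['<', '>', '^', 'v', 'A'] → (∀ c ∈ rest, keyOK c = true) →
    loopA rest (dval prev) res = loopB rest prev res := by
  intro rest
  induction rest with
  | nil => intro _ _ _ _; rfl
  | cons c rest ih =>
    intro prev res hp hall
    have hc : c ∈ ['<', '>', '^', 'v', 'A'] := memK c (hall c (by simp))
    obtain ⟨hd, ht⟩ := tableOK prev c hp hc
    simp only [loopA, loopB, hd, ht]
    exact ih c _ hc (fun x hx => hall x (List.mem_cons_of_mem _ hx))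

-- ===== VERDICT (by name: the statement is the Claim_ definition above) =====
theorem resolve_directional_keypad_spec : Claim_equal_resolve_directional_keypad := by
  intro code _ hpre
  unfold Spec_resolve_directional_keypad resolve_directional_keypad resolve_directional_keypad_alt
  have hall : ∀ c ∈ code.toList, keyOK c = true := List.all_eq_true.mp hpre
  have h := loop_eq code.toList 'A' PySem.Dict.empty (by decide) hall
  rw [show ((0, 2) : Int × Int) = dval 'A' from rfl, h]
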